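-- pv_equiv track=rewrite | github.com/haaslogan1/advent-of-code-2023 | Day 9/part2.py | recursiveF
-- ===== SOURCE A (Python) =====
-- def recursiveF(x):
-- 	# check whether all values in x are 0
-- 	coutn = 0
-- 	for y in x:
-- 		coutn += y
-- 		# Break out of this loop
-- 		if y > 0 or y < 0:
-- 			break
--
-- 	# All values are zero, return zero
-- 	if coutn == 0:
-- 		return 0
--
-- 	# create the diff array
-- 	diff = []
-- 	for y in range(1, len(x)):
-- 		diff.append(x[y] - x[y - 1])
--
-- 	return x[-1] + recursiveF(diff)
-- ===== SOURCE B (Python) =====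
-- def recursiveF(x):
--     # Newton forward-difference extrapolation in one pass:
--     # next term = sum_{j<n} (-1)**(n-1-j) * C(n, j) * x[j]
--     n = len(x)
--     res = 0
--     c = 1
--     sign = 1 if (n - 1) % 2 == 0 else -1
--     for j, v in enumerate(x):
--         res += sign * c * v
--         c = c * (n - j) // (j + 1)
--         sign = -sign
--     return res
-- ===== Notes on version B (the rewrite author's own statement) =====
-- stated objective: faster
-- what changed: Replaces the recursive difference-table construction with Newton's forward-difference closed form: a single pass summing (-1)^(n-1-j)*C(n,j)*x[j] with the binomial coefficient updated incrementally.
import Mathlib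
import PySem

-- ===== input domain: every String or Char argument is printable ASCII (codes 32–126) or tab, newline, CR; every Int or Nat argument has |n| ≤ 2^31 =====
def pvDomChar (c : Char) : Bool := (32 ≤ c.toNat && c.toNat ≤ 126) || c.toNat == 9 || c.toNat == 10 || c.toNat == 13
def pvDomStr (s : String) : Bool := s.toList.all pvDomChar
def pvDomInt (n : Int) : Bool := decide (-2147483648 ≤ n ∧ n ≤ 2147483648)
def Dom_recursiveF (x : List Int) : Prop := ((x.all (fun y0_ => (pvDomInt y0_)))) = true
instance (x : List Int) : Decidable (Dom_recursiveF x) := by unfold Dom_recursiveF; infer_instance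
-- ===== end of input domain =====

-- B replaces A's recursive difference-table construction by Newton's forward-difference
-- closed form (one weighted binomial pass); proved to return the same value on every input.

-- ===== PORT A =====
-- the 'for y in x: coutn += y; if y > 0 or y < 0: break' loop
def coutnLoop : Int → List Int → Int
  | c, [] => c
  | c, y :: ys => if y > 0 ∨ y < 0 then c + y else coutnLoop (c + y) ys

-- 'diff = []; for y in range(1, len(x)): diff.append(x[y] - x[y-1])'
-- (indices y and y-1 are always in range, so the total pyGetD form is exact here)
def diffList (x : List Int) : List Int :=
  (PySem.List.pyRange 1 (x.length : Int) 1).foldl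
    (fun acc y => acc ++ [PySem.List.pyGetD x y 0 - PySem.List.pyGetD x (y - 1) 0]) []

-- the next two lemmas are cited by recursiveF's decreasing_by
lemma diffList_length (x : List Int) : (diffList x).length = x.length - 1 := by
  rw [diffList, PySem.List.foldl_append_singleton_eq_map]
  simp only [List.nil_append, List.length_map, PySem.List.length_pyRange_one]
  omega

lemma ne_nil_of_coutn {x : List Int} (h : coutnLoop 0 x ≠ 0) : x ≠ [] := by
  intro he; subst he; simp [coutnLoop] at h

def recursiveF (x : List Int) : Int :=
  if _h : coutnLoop 0 x = 0 then 0
  else PySem.List.pyGetD x (-1) 0 + recursiveF (diffList x)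
termination_by x.length
decreasing_by
  rw [diffList_length]
  have := ne_nil_of_coutn _h
  have : x.length ≠ 0 := fun h0 => this (List.eq_nil_of_length_eq_zero h0)
  omega

-- ===== PORT B =====
-- 'for j, v in enumerate(x): res += sign*c*v; c = c*(n-j)//(j+1); sign = -sign'
def altLoop (n : Int) : List Int → Int → Int → Int → Int → Int
  | [], _j, _c, _sign, res => res
  | v :: vs, j, c, sign, res =>
      altLoop n vs (j + 1) (PySem.Int.floordiv (c * (n - j)) (j + 1)) (-sign) (res + sign * c * v)

def recursiveF_alt (x : List Int) : Int :=
  let n : Int := (x.length : Int)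
  let sign : Int := if PySem.Int.mod (n - 1) 2 = 0 then 1 else -1
  altLoop n x 0 1 sign 0

-- ===== PRECONDITION & SPEC =====
def Spec_recursiveF (x : List Int) (out : Int) : Prop := out = recursiveF_alt x
instance (x : List Int) (out : Int) : Decidable (Spec_recursiveF x out) := by unfold Spec_recursiveF; infer_instance

-- ===== CLAIM (what is proved, stated in full; the proofs are below) =====
def Claim_equal_recursiveF : Prop := ∀ (x : List Int), Dom_recursiveF x → Spec_recursiveF x (recursiveF x)

-- ===== LEMMAS AND PROOFS =====

-- the common value both ports compute: Newton's forward-difference extrapolation sum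
def newtonSum (x : List Int) : Int :=
  ∑ j ∈ Finset.range x.length,
    (-1 : Int) ^ (x.length + 1 + j) * (x.length.choose j : Int) * x.getD j 0

-- A's zero test really means "all entries are zero"
lemma coutn_zero_all {x : List Int} (h : coutnLoop 0 x = 0) : ∀ y ∈ x, y = 0 := by
  induction x with
  | nil => simp
  | cons y ys ih =>
    intro z hz
    by_cases hy : y > 0 ∨ y < 0
    · simp [coutnLoop, hy] at h
      omega
    · have hy0 : y = 0 := by omega
      subst hy0
      simp [coutnLoop] at h
      rcases List.mem_cons.mp hz with rfl | hz'
      · rfl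
      · exact ih h z hz'

lemma newton_zero {x : List Int} (h : ∀ y ∈ x, y = 0) : newtonSum x = 0 := by
  apply Finset.sum_eq_zero
  intro j hj
  have hj' : j < x.length := Finset.mem_range.mp hj
  have : x.getD j 0 = 0 := by
    rw [List.getD_eq_getElem x 0 hj']
    exact h _ (List.getElem_mem hj')
  rw [this]; ring

lemma altLoop_inv (n : ℕ) : ∀ (vs : List Int) (j : ℕ) (res : Int), j + vs.length = n →
    altLoop (n : Int) vs (j : Int) ((n.choose j : ℕ) : Int) ((-1 : Int) ^ (n + 1 + j)) res
      = res + ∑ i ∈ Finset.range vs.length,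
          (-1 : Int) ^ (n + 1 + j + i) * (n.choose (j + i) : Int) * vs.getD i 0 := by
  intro vs
  induction vs with
  | nil => intro j res _; simp [altLoop]
  | cons v tl ih =>
    intro j res h
    have hjn : j < n := by simp at h; omega
    have hdiv : PySem.Int.floordiv (((n.choose j : ℕ) : Int) * ((n : Int) - (j : Int))) ((j : Int) + 1)
        = ((n.choose (j+1) : ℕ) : Int) := by
      have hc : (n.choose j) * (n - j) = n.choose (j+1) * (j+1) := (Nat.choose_succ_right_eq n j).symm
      have hcast : ((n.choose j : ℕ) : Int) * ((n : Int) - (j : Int))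
          = ((j : Int) + 1) * ((n.choose (j+1) : ℕ) : Int) := by
        have := congrArg (fun m : ℕ => (m : Int)) hc
        push_cast [Nat.cast_sub hjn.le] at this
        linarith [this]
      rw [hcast, PySem.Int.floordiv_eq_ediv_of_pos (by omega)]
      exact Int.mul_ediv_cancel_left _ (by omega)
    have hsign : -((-1 : Int) ^ (n + 1 + j)) = (-1 : Int) ^ (n + 1 + (j + 1)) := by
      have e : n + 1 + (j + 1) = (n + 1 + j) + 1 := by omega
      rw [e, pow_succ]; ring
    show altLoop (n : Int) tl ((j : Int) + 1) _ _ _ = _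
    have hj1 : ((j : Int) + 1) = ((j + 1 : ℕ) : Int) := by push_cast; ring
    rw [hdiv, hsign, hj1, ih (j + 1) _ (by simp at h ⊢; omega)]
    rw [List.length_cons, Finset.sum_range_succ']
    have hterm : ∀ i ∈ Finset.range tl.length,
        (-1 : Int) ^ (n + 1 + (j + 1) + i) * (n.choose (j + 1 + i) : Int) * tl.getD i 0
          = (-1 : Int) ^ (n + 1 + j + (i + 1)) * (n.choose (j + (i + 1)) : Int) * (v :: tl).getD (i + 1) 0 := by
      intro i _
      have e1 : n + 1 + (j + 1) + i = n + 1 + j + (i + 1) := by omega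
      have e2 : j + 1 + i = j + (i + 1) := by omega
      rw [e1, e2, List.getD_cons_succ]
    rw [Finset.sum_congr rfl hterm]
    simp
    ring

lemma alt_eq_newton (x : List Int) : recursiveF_alt x = newtonSum x := by
  have hinv := altLoop_inv x.length x 0 0 (by simp)
  simp only [Nat.cast_zero, Nat.choose_zero_right, Nat.cast_one, zero_add, Nat.add_zero] at hinv
  rcases Nat.eq_zero_or_pos x.length with h0 | hpos
  · have hx : x = [] := List.length_eq_zero_iff.mp h0
    subst hx; simp [recursiveF_alt, altLoop, newtonSum]
  · have hsign0 : (if PySem.Int.mod ((x.length : Int) - 1) 2 = 0 then (1:Int) else -1)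
        = (-1 : Int) ^ (x.length + 1) := by
      rw [PySem.Int.mod_eq_emod_of_pos (by omega)]
      rcases Nat.even_or_odd x.length with ⟨k, hk⟩ | ⟨k, hk⟩
      · have h1 : ((x.length : Int) - 1) % 2 ≠ 0 := by
          have : (x.length : Int) = 2 * k := by rw [hk]; push_cast; ring
          omega
        rw [if_neg h1, hk]
        have e : k + k + 1 = 2 * k + 1 := by omega
        rw [e, pow_succ, pow_mul]; simp
      · have h1 : ((x.length : Int) - 1) % 2 = 0 := by
          have : (x.length : Int) = 2 * k + 1 := by rw [hk]; push_cast; ring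
          omega
        rw [if_pos h1, hk]
        have e : 2 * k + 1 + 1 = 2 * (k + 1) := by omega
        rw [e, pow_mul]; simp
    simp only [recursiveF_alt]
    rw [hsign0, hinv, newtonSum]

lemma diffList_eq (x : List Int) :
    diffList x = (List.range (x.length - 1)).map (fun j => x.getD (j+1) 0 - x.getD j 0) := by
  rw [diffList, PySem.List.foldl_append_singleton_eq_map, PySem.List.pyRange_one, List.map_map,
    List.nil_append]
  have hl : ((x.length : Int) - 1).toNat = x.length - 1 := by omega
  rw [hl]
  apply List.map_congr_left
  intro k _
  show PySem.List.pyGetD x (1 + (k:Int)) 0 - PySem.List.pyGetD x (1 + (k:Int) - 1) 0 = _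
  have e1 : (1 : Int) + (k:Int) = ((k+1 : ℕ) : Int) := by push_cast; ring
  rw [e1]
  rw [PySem.List.pyGetD_natCast]
  have e3 : ((k+1 : ℕ) : Int) - 1 = ((k : ℕ) : Int) := by push_cast; ring
  rw [e3, PySem.List.pyGetD_natCast]

lemma pascal_step (m : ℕ) (X : ℕ → Int) :
    ∑ j ∈ Finset.range (m+1), (-1:Int)^(m+1+1+j) * ((m+1).choose j : Int) * X j
      = X m + ∑ j ∈ Finset.range m, (-1:Int)^(m+1+j) * (m.choose j : Int) * (X (j+1) - X j) := by
  rw [Finset.sum_range_succ']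
  have hstep : ∀ j ∈ Finset.range m,
      (-1:Int)^(m+1+1+(j+1)) * (((m+1).choose (j+1) : ℕ) : Int) * X (j+1)
        = (-1:Int)^(m+1+j) * ((m.choose j : ℕ) : Int) * X (j+1)
          + (-1:Int)^(m+(j+1)) * ((m.choose (j+1) : ℕ) : Int) * X (j+1) := by
    intro j _
    have e1 : m+1+1+(j+1) = (m+1+j)+2 := by omega
    have e2 : m+(j+1) = (m+1+j)+2 - 2 := by omega
    have e2' : m+(j+1) = m+1+j := by omega
    rw [Nat.choose_succ_succ, e1, e2', pow_add]
    push_cast; ring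
  rw [Finset.sum_congr rfl hstep, Finset.sum_add_distrib]
  have h0 : (-1:Int)^(m+1+1+0) * (((m+1).choose 0 : ℕ) : Int) * X 0
      = (-1:Int)^(m+0) * ((m.choose 0 : ℕ) : Int) * X 0 := by
    have e : m+1+1+0 = (m+0)+2 := by omega
    rw [e, pow_add]; simp
  rw [h0, add_assoc,
    ← Finset.sum_range_succ' (fun j => (-1:Int)^(m+j) * ((m.choose j : ℕ) : Int) * X j) m,
    Finset.sum_range_succ]
  have hm : (-1:Int)^(m+m) * ((m.choose m : ℕ) : Int) * X m = X m := by
    have e : m+m = 2*m := by omega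
    rw [e, pow_mul]; simp
  rw [hm]
  have hrhs : ∀ j ∈ Finset.range m,
      (-1:Int)^(m+1+j) * ((m.choose j : ℕ) : Int) * (X (j+1) - X j)
        = (-1:Int)^(m+1+j) * ((m.choose j : ℕ) : Int) * X (j+1)
          + (-1:Int)^(m+j) * ((m.choose j : ℕ) : Int) * X j := by
    intro j _
    have e : m+1+j = (m+j)+1 := by omega
    rw [e, pow_succ]; ring
  rw [Finset.sum_congr rfl hrhs, Finset.sum_add_distrib]
  ring

lemma newton_step (x : List Int) (hx : x ≠ []) :
    newtonSum x = PySem.List.pyGetD x (-1) 0 + newtonSum (diffList x) := by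
  obtain ⟨m, hm⟩ : ∃ m, x.length = m + 1 :=
    ⟨x.length - 1, by have := List.length_pos_iff.mpr hx; omega⟩
  have hdlen : (diffList x).length = m := by rw [diffList_length, hm]; omega
  have hdget : ∀ j, j < m → (diffList x).getD j 0 = x.getD (j+1) 0 - x.getD j 0 := by
    intro j hj
    rw [diffList_eq]
    have hlm : x.length - 1 = m := by omega
    rw [hlm, List.getD_eq_getElem _ 0 (by simpa using hj)]
    simp
  have hlast : PySem.List.pyGetD x (-1) 0 = x.getD m 0 := by
    rw [PySem.List.pyGetD_neg_ofNat x 1 0 (by omega) (by omega),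
      List.getD_eq_getElem x 0 (by omega)]
    simp [hm]
  have hdsum : newtonSum (diffList x)
      = ∑ j ∈ Finset.range m,
          (-1:Int)^(m+1+j) * ((m.choose j : ℕ) : Int) * (x.getD (j+1) 0 - x.getD j 0) := by
    rw [newtonSum, hdlen]
    exact Finset.sum_congr rfl (fun j hj => by rw [hdget j (Finset.mem_range.mp hj)])
  rw [hdsum, hlast, newtonSum, hm]
  exact pascal_step m (fun j => x.getD j 0)

lemma a_eq_newton : ∀ (n : ℕ) (x : List Int), x.length = n → recursiveF x = newtonSum x := by
  intro n
  induction n using Nat.strong_induction_on with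
  | _ n ih =>
    intro x hxn
    rw [recursiveF]
    split_ifs with h
    · exact (newton_zero (coutn_zero_all h)).symm
    · have hx : x ≠ [] := ne_nil_of_coutn h
      have hlt : (diffList x).length < n := by
        rw [diffList_length]
        have : x.length ≠ 0 := fun h0 => hx (List.eq_nil_of_length_eq_zero h0)
        omega
      rw [ih _ hlt (diffList x) rfl, newton_step x hx]

-- ===== VERDICT (by name: the statement is the Claim_ definition above) =====
theorem recursiveF_spec : Claim_equal_recursiveF := by
  intro x _
  unfold Spec_recursiveF
  rw [alt_eq_newton, ← a_eq_newton x.length x rfl]
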